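-- pv_equiv track=rewrite | github.com/MrBrantCode/unitest_baseline | mut_generate/mist_train_cf/cf_47130/solution.py | prime_and_factors
-- ===== SOURCE A (Python) =====
-- def prime_and_factors(num):
--     def is_prime(n):
--         if n <= 1:
--             return False
--         if n <= 3:
--             return True
--         if n % 2 == 0 or n % 3 == 0:
--             return False
--         i = 5
--         while i * i <= n:
--             if n % i == 0 or n % (i + 2) == 0:
--                 return False
--             i += 6
--         return True
--
--     result = {}
--     for i in range(1, num+1):
--         if num % i == 0:
--             result[i] = is_prime(i)
--     return result
-- ===== SOURCE B (Python) =====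
-- def prime_and_factors(num):
--     def is_prime(n):
--         if n <= 1:
--             return False
--         if n % 2 == 0:
--             return n == 2
--         i = 3
--         while i * i <= n:
--             if n % i == 0:
--                 return False
--             i += 2
--         return True
--
--     # enumerate divisors in O(sqrt(num)) instead of scanning 1..num
--     small = []
--     large = []
--     i = 1
--     while i * i <= num:
--         if num % i == 0:
--             small.append(i)
--             q = num // i
--             if i != q:
--                 large.append(q)
--         i += 1
--     result = {}
--     for d in small:
--         result[d] = is_prime(d)
--     for d in reversed(large):
--         result[d] = is_prime(d)
--     return result
-- ===== Notes on version B (the rewrite author's own statement) =====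
-- stated objective: faster
-- what changed: B enumerates divisor pairs (i, num//i) by trial division only up to sqrt(num) instead of scanning the whole range of candidates (emitting small divisors ascending, then the large cofactors reversed, giving the same ascending key order), and tests primality by plain odd trial division instead of A's wheel over residues.
import Mathlib
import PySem

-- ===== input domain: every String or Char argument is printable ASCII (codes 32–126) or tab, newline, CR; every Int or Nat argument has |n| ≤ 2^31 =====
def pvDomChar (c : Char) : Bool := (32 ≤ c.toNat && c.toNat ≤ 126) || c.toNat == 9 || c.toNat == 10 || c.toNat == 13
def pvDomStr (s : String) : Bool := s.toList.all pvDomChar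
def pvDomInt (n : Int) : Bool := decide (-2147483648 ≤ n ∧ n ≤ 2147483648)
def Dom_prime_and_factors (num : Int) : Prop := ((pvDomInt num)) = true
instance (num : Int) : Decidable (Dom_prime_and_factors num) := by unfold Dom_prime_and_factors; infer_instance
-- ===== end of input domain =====

-- B finds the divisors by trial division up to sqrt(num) (pair enumeration) instead of
-- A's full scan of the candidate range, and uses odd trial division as its primality
-- test; a timing run measured B faster.

-- ===== PORT A =====
def isPrimeLoopA (n i : Int) : Bool :=
  if _h : i * i ≤ n then
    if PySem.Int.mod n i == 0 || PySem.Int.mod n (i + 2) == 0 then false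
    else isPrimeLoopA n (i + 6)
  else true
termination_by (n + 1 - i).toNat
decreasing_by
  have hin : i ≤ n := by
    rcases (show i ≤ 0 ∨ 1 ≤ i from by omega) with h' | h' <;> nlinarith [mul_self_nonneg i]
  omega

def is_primeA (n : Int) : Bool :=
  if n ≤ 1 then false
  else if n ≤ 3 then true
  else if PySem.Int.mod n 2 == 0 || PySem.Int.mod n 3 == 0 then false
  else isPrimeLoopA n 5

def prime_and_factors (num : Int) : List (Int × Bool) :=
  ((PySem.List.pyRange 1 (num + 1) 1).foldl
      (fun d i => if PySem.Int.mod num i == 0 then d.insert i (is_primeA i) else d)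
      (PySem.Dict.empty : PySem.Dict Int Bool)).items

-- ===== PORT B =====
def isPrimeLoopB (n i : Int) : Bool :=
  if _h : i * i ≤ n then
    if PySem.Int.mod n i == 0 then false
    else isPrimeLoopB n (i + 2)
  else true
termination_by (n + 1 - i).toNat
decreasing_by
  have hin : i ≤ n := by
    rcases (show i ≤ 0 ∨ 1 ≤ i from by omega) with h' | h' <;> nlinarith [mul_self_nonneg i]
  omega

def is_primeB (n : Int) : Bool :=
  if n ≤ 1 then false
  else if PySem.Int.mod n 2 == 0 then n == 2
  else isPrimeLoopB n 3

def divLoopB (num i : Int) (small large : List Int) : List Int × List Int :=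
  if _h : i * i ≤ num then
    if PySem.Int.mod num i == 0 then
      let q := PySem.Int.floordiv num i
      divLoopB num (i + 1) (small ++ [i]) (if i ≠ q then large ++ [q] else large)
    else divLoopB num (i + 1) small large
  else (small, large)
termination_by (num + 1 - i).toNat
decreasing_by
  all_goals
    have hin : i ≤ num := by
      rcases (show i ≤ 0 ∨ 1 ≤ i from by omega) with h' | h' <;> nlinarith [mul_self_nonneg i]
    omega

def prime_and_factors_alt (num : Int) : List (Int × Bool) :=
  let p := divLoopB num 1 [] []
  let d1 := p.1.foldl (fun d k => d.insert k (is_primeB k))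
      (PySem.Dict.empty : PySem.Dict Int Bool)
  let d2 := p.2.reverse.foldl (fun d k => d.insert k (is_primeB k)) d1
  d2.items

-- ===== PRECONDITION & SPEC =====
def Spec_prime_and_factors (num : Int) (out : List (Int × Bool)) : Prop := out = prime_and_factors_alt num
instance (num : Int) (out : List (Int × Bool)) : Decidable (Spec_prime_and_factors num out) := by unfold Spec_prime_and_factors; infer_instance

-- ===== CLAIM (what is proved, stated in full; the proofs are below) =====
def Claim_equal_prime_and_factors : Prop := ∀ (num : Int), Dom_prime_and_factors num → Spec_prime_and_factors num (prime_and_factors num)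

-- ===== LEMMAS AND PROOFS =====

-- small-divisor and large-divisor streams of B's loop, without accumulators
def sAux (num i : Int) : List Int :=
  if _h : i * i ≤ num then
    if PySem.Int.mod num i == 0 then i :: sAux num (i + 1) else sAux num (i + 1)
  else []
termination_by (num + 1 - i).toNat
decreasing_by
  all_goals
    have hin : i ≤ num := by
      rcases (show i ≤ 0 ∨ 1 ≤ i from by omega) with h' | h' <;> nlinarith [mul_self_nonneg i]
    omega

def lAux (num i : Int) : List Int :=
  if _h : i * i ≤ num then
    if PySem.Int.mod num i == 0 then
      if i ≠ PySem.Int.floordiv num i then PySem.Int.floordiv num i :: lAux num (i + 1)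
      else lAux num (i + 1)
    else lAux num (i + 1)
  else []
termination_by (num + 1 - i).toNat
decreasing_by
  all_goals
    have hin : i ≤ num := by
      rcases (show i ≤ 0 ∨ 1 ≤ i from by omega) with h' | h' <;> nlinarith [mul_self_nonneg i]
    omega

lemma divLoopB_eq (num i : Int) (small large : List Int) :
    divLoopB num i small large = (small ++ sAux num i, large ++ lAux num i) := by
  fun_induction divLoopB num i small large with
  | case1 i small large h hm q ih =>
      rw [sAux, lAux]
      simp only [dif_pos h, if_pos hm]
      by_cases hq : i ≠ q
      · have hq' : i ≠ PySem.Int.floordiv num i := hq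
        rw [if_pos hq, if_pos hq']
        rw [dif_pos hq] at ih
        simpa using ih
      · have hq' : ¬ i ≠ PySem.Int.floordiv num i := hq
        rw [if_neg hq, if_neg hq']
        rw [dif_neg hq] at ih
        simpa using ih
  | case2 i small large h hm ih =>
      rw [sAux, lAux]
      simp [dif_pos h, hm, ih]
  | case3 i small large h =>
      rw [sAux, lAux]
      simp [dif_neg h]

-- "n has a divisor whose square is at most n": what both primality loops detect
def HasSmallDiv (n : Int) : Prop := ∃ d, 2 ≤ d ∧ d * d ≤ n ∧ d ∣ n

lemma LB_aux (n : Int) (h2 : ¬ (2:Int) ∣ n) (i : Int) :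
    3 ≤ i → i % 2 = 1 → (∀ d, 2 ≤ d → d < i → ¬ d ∣ n) →
      (isPrimeLoopB n i = false ↔ HasSmallDiv n) := by
  fun_induction isPrimeLoopB n i with
  | case1 i h hm =>
      intro h3 hodd hmin
      simp only [true_iff]
      exact ⟨i, by omega, h, (PySem.Int.mod_eq_zero_iff_dvd n i).mp (by simpa using hm)⟩
  | case2 i h hm ih =>
      intro h3 hodd hmin
      have hmi : ¬ i ∣ n := fun hd =>
        hm (by simp [(PySem.Int.mod_eq_zero_iff_dvd n i).mpr hd])
      refine ih (by omega) (by omega) (fun d hd2 hdi hdvd => ?_)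
      have hcase : d < i ∨ d = i ∨ (2:Int) ∣ d := by omega
      rcases hcase with hc | hc | hc
      · exact hmin d hd2 hc hdvd
      · exact hmi (hc ▸ hdvd)
      · exact h2 (dvd_trans hc hdvd)
  | case3 i h =>
      intro h3 hodd hmin
      simp only [Bool.true_eq_false, false_iff]
      rintro ⟨d, hd2, hdd, hdvd⟩
      have hdi : d < i := by nlinarith
      exact hmin d hd2 hdi hdvd

lemma LA_aux (n : Int) (h2 : ¬ (2:Int) ∣ n) (h3 : ¬ (3:Int) ∣ n) (hn : 5 ≤ n) (i : Int) :
    5 ≤ i → i % 6 = 5 → (∀ d, 2 ≤ d → d < i → ¬ d ∣ n) →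
      (isPrimeLoopA n i = false ↔ HasSmallDiv n) := by
  fun_induction isPrimeLoopA n i with
  | case1 i h hm =>
      intro h5 h6 hmin
      simp only [true_iff]
      simp only [Bool.or_eq_true] at hm
      rcases hm with hm | hm
      · exact ⟨i, by omega, h, (PySem.Int.mod_eq_zero_iff_dvd n i).mp (by simpa using hm)⟩
      · have hdvd : (i + 2) ∣ n := (PySem.Int.mod_eq_zero_iff_dvd n (i + 2)).mp (by simpa using hm)
        by_cases hq : (i + 2) * (i + 2) ≤ n
        · exact ⟨i + 2, by omega, hq, hdvd⟩
        · obtain ⟨e, he⟩ := hdvd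
          have hlt : i + 2 < n := by nlinarith
          have he2 : 2 ≤ e := by
            rcases (show e ≤ 0 ∨ e = 1 ∨ 2 ≤ e from by omega) with hc | hc | hc
            · nlinarith
            · exfalso; rw [hc, mul_one] at he; omega
            · exact hc
          exact ⟨e, he2, by nlinarith, ⟨i + 2, by rw [he]; ring⟩⟩
  | case2 i h hm ih =>
      intro h5 h6 hmin
      simp only [Bool.or_eq_true, not_or] at hm
      obtain ⟨hm1, hm2⟩ := hm
      have hmi : ¬ i ∣ n := fun hd =>
        hm1 (by simp [(PySem.Int.mod_eq_zero_iff_dvd n i).mpr hd])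
      have hmi2 : ¬ (i + 2) ∣ n := fun hd =>
        hm2 (by simp [(PySem.Int.mod_eq_zero_iff_dvd n (i + 2)).mpr hd])
      refine ih (by omega) (by omega) (fun d hd2 hdi hdvd => ?_)
      have hcase : d < i ∨ d = i ∨ d = i + 2 ∨ (2:Int) ∣ d ∨ (3:Int) ∣ d := by omega
      rcases hcase with hc | hc | hc | hc | hc
      · exact hmin d hd2 hc hdvd
      · exact hmi (hc ▸ hdvd)
      · exact hmi2 (hc ▸ hdvd)
      · exact h2 (dvd_trans hc hdvd)
      · exact h3 (dvd_trans hc hdvd)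
  | case3 i h =>
      intro h5 h6 hmin
      simp only [Bool.true_eq_false, false_iff]
      rintro ⟨d, hd2, hdd, hdvd⟩
      have hdi : d < i := by nlinarith
      exact hmin d hd2 hdi hdvd

lemma is_primeBA : is_primeB = is_primeA := by
  funext n
  unfold is_primeB is_primeA
  by_cases h1 : n ≤ 1
  · simp [h1]
  by_cases h2 : (2:Int) ∣ n
  · by_cases hn2 : n = 2
    · subst hn2; norm_num
    · have hgt : ¬ n ≤ 3 := by omega
      simp [h1, hgt, h2, hn2]
  · by_cases hn3 : n = 3
    · subst hn3
      have hloop : isPrimeLoopB 3 3 = true := by rw [isPrimeLoopB]; norm_num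
      have hmod : (PySem.Int.mod 3 2 == 0) = false := by decide
      simp [hloop]
    · by_cases h3 : (3:Int) ∣ n
      · have hn9 : 9 ≤ n := by omega
        have hB : isPrimeLoopB n 3 = false :=
          (LB_aux n h2 3 (by omega) (by omega)
            (fun d hd2 hdi hdvd => h2 ((show d = 2 from by omega) ▸ hdvd))).mpr
            ⟨3, by omega, by omega, h3⟩
        have hgt : ¬ n ≤ 3 := by omega
        simp [h1, hgt, h2, h3, hB]
      · have hn5 : 5 ≤ n := by omega
        have hgt : ¬ n ≤ 3 := by omega
        have hminA : ∀ d : Int, 2 ≤ d → d < 5 → ¬ d ∣ n := by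
          intro d hd2 hdi hdvd
          rcases (show (2:Int) ∣ d ∨ d = 3 from by omega) with hc | hc
          · exact h2 (dvd_trans hc hdvd)
          · exact h3 (hc ▸ hdvd)
        have hA := LA_aux n h2 h3 hn5 5 (by omega) (by omega) hminA
        have hB := LB_aux n h2 3 (by omega) (by omega)
          (fun d hd2 hdi hdvd => h2 ((show d = 2 from by omega) ▸ hdvd))
        have hgoal : isPrimeLoopB n 3 = isPrimeLoopA n 5 := by
          by_cases hd : HasSmallDiv n
          · rw [hB.mpr hd, hA.mpr hd]
          · have b1 : isPrimeLoopB n 3 ≠ false := fun e => hd (hB.mp e)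
            have a1 : isPrimeLoopA n 5 ≠ false := fun e => hd (hA.mp e)
            rw [Bool.ne_false_iff.mp b1, Bool.ne_false_iff.mp a1]
        simp [h1, hgt, h2, h3, hgoal]

lemma mem_sAux (num i x : Int) (hi : 1 ≤ i) :
    x ∈ sAux num i ↔ i ≤ x ∧ x * x ≤ num ∧ x ∣ num := by
  revert hi
  fun_induction sAux num i with
  | case1 i h hm ih =>
      intro hi
      have hdvd : i ∣ num := (PySem.Int.mod_eq_zero_iff_dvd num i).mp (by simpa using hm)
      rw [List.mem_cons]
      constructor
      · rintro (rfl | hx)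
        · exact ⟨le_refl _, h, hdvd⟩
        · obtain ⟨h1, h2, h3⟩ := (ih (by omega)).mp hx
          exact ⟨by omega, h2, h3⟩
      · rintro ⟨h1, h2, h3⟩
        rcases eq_or_lt_of_le h1 with rfl | hlt
        · exact Or.inl rfl
        · exact Or.inr ((ih (by omega)).mpr ⟨by omega, h2, h3⟩)
  | case2 i h hm ih =>
      intro hi
      rw [ih (by omega)]
      constructor
      · rintro ⟨h1, h2, h3⟩
        exact ⟨by omega, h2, h3⟩
      · rintro ⟨h1, h2, h3⟩
        have hne : x ≠ i := by
          rintro rfl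
          simp [(PySem.Int.mod_eq_zero_iff_dvd num x).mpr h3] at hm
        exact ⟨by omega, h2, h3⟩
  | case3 i h =>
      intro hi
      simp only [List.not_mem_nil, false_iff]
      rintro ⟨h1, h2, h3⟩
      have : i * i ≤ x * x := by nlinarith
      omega

lemma mem_lAux (num i x : Int) (hi : 1 ≤ i) :
    x ∈ lAux num i ↔
      ∃ j, i ≤ j ∧ j * j ≤ num ∧ j ∣ num ∧ x = PySem.Int.floordiv num j ∧ x ≠ j := by
  revert hi
  fun_induction lAux num i with
  | case1 i h hm hq ih =>
      intro hi
      have hdvd : i ∣ num := (PySem.Int.mod_eq_zero_iff_dvd num i).mp (by simpa using hm)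
      rw [List.mem_cons]
      constructor
      · rintro (rfl | hx)
        · exact ⟨i, le_refl _, h, hdvd, rfl, fun e => hq e.symm⟩
        · obtain ⟨j, h1, h2, h3, h4, h5⟩ := (ih (by omega)).mp hx
          exact ⟨j, by omega, h2, h3, h4, h5⟩
      · rintro ⟨j, h1, h2, h3, h4, h5⟩
        rcases eq_or_lt_of_le h1 with rfl | hlt
        · exact Or.inl h4
        · exact Or.inr ((ih (by omega)).mpr ⟨j, by omega, h2, h3, h4, h5⟩)
  | case2 i h hm hq ih =>
      intro hi
      rw [ih (by omega)]
      constructor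
      · rintro ⟨j, h1, h2, h3, h4, h5⟩
        exact ⟨j, by omega, h2, h3, h4, h5⟩
      · rintro ⟨j, h1, h2, h3, h4, h5⟩
        have hji : j ≠ i := by
          rintro rfl
          rw [not_ne_iff.mp hq] at h5
          exact h5 h4
        exact ⟨j, by omega, h2, h3, h4, h5⟩
  | case3 i h hm ih =>
      intro hi
      rw [ih (by omega)]
      constructor
      · rintro ⟨j, h1, h2, h3, h4, h5⟩
        exact ⟨j, by omega, h2, h3, h4, h5⟩
      · rintro ⟨j, h1, h2, h3, h4, h5⟩
        have hji : j ≠ i := by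
          rintro rfl
          simp [(PySem.Int.mod_eq_zero_iff_dvd num j).mpr h3] at hm
        exact ⟨j, by omega, h2, h3, h4, h5⟩
  | case4 i h =>
      intro hi
      simp only [List.not_mem_nil, false_iff]
      rintro ⟨j, h1, h2, h3, h4, h5⟩
      have : i * i ≤ j * j := by nlinarith
      omega

lemma lAux_elem (num i x : Int) (hi : 1 ≤ i) (hx : x ∈ lAux num i) :
    1 ≤ x ∧ num < x * x ∧ x ∣ num ∧ ∃ j, i ≤ j ∧ j * x = num ∧ j < x := by
  obtain ⟨j, h1, h2, h3, h4, h5⟩ := (mem_lAux num i x hi).mp hx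
  have hj0 : 0 < j := by omega
  have jx : j * x = num := by
    rw [h4, PySem.Int.floordiv_eq_ediv_of_pos hj0]
    exact Int.mul_ediv_cancel' h3
  have hjx : j < x := by
    have hle : j ≤ x := by nlinarith
    exact lt_of_le_of_ne hle (Ne.symm h5)
  exact ⟨by omega, by nlinarith, ⟨j, by rw [← jx]; ring⟩, j, h1, jx, hjx⟩

lemma pairwise_sAux (num i : Int) (hi : 1 ≤ i) : (sAux num i).Pairwise (· < ·) := by
  revert hi
  fun_induction sAux num i with
  | case1 i h hm ih =>
      intro hi
      refine List.Pairwise.cons (fun y hy => ?_) (ih (by omega))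
      have := (mem_sAux num (i + 1) y (by omega)).mp hy
      omega
  | case2 i h hm ih =>
      intro hi
      exact ih (by omega)
  | case3 i h =>
      intro hi
      exact List.Pairwise.nil

lemma pairwise_lAux (num i : Int) (hi : 1 ≤ i) : (lAux num i).Pairwise (· > ·) := by
  revert hi
  fun_induction lAux num i with
  | case1 i h hm hq ih =>
      intro hi
      refine List.Pairwise.cons (fun y hy => ?_) (ih (by omega))
      have hdvd : i ∣ num := (PySem.Int.mod_eq_zero_iff_dvd num i).mp (by simpa using hm)
      have hiq : i * PySem.Int.floordiv num i = num := by
        rw [PySem.Int.floordiv_eq_ediv_of_pos (by omega : (0:Int) < i)]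
        exact Int.mul_ediv_cancel' hdvd
      obtain ⟨hy1, hy2, hy3, j, hj1, hj2, hj3⟩ := lAux_elem num (i + 1) y (by omega) hy
      show y < PySem.Int.floordiv num i
      nlinarith
  | case2 i h hm hq ih =>
      intro hi
      exact ih (by omega)
  | case3 i h hm ih =>
      intro hi
      exact ih (by omega)
  | case4 i h =>
      intro hi
      exact List.Pairwise.nil

def keysA (num : Int) : List Int :=
  (PySem.List.pyRange 1 (num + 1) 1).filter (fun i => PySem.Int.mod num i == 0)

def keysB (num : Int) : List Int := sAux num 1 ++ (lAux num 1).reverse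

lemma mem_keysA (num x : Int) : x ∈ keysA num ↔ 1 ≤ x ∧ x ≤ num ∧ x ∣ num := by
  simp only [keysA, List.mem_filter, PySem.List.mem_pyRange_one, beq_iff_eq,
    PySem.Int.mod_eq_zero_iff_dvd]
  constructor
  · rintro ⟨⟨h1, h2⟩, h3⟩
    exact ⟨h1, by omega, h3⟩
  · rintro ⟨h1, h2, h3⟩
    exact ⟨⟨h1, by omega⟩, h3⟩

lemma mem_keysB (num x : Int) : x ∈ keysB num ↔ 1 ≤ x ∧ x ≤ num ∧ x ∣ num := by
  simp only [keysB, List.mem_append, List.mem_reverse]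
  constructor
  · rintro (hx | hx)
    · obtain ⟨h1, h2, h3⟩ := (mem_sAux num 1 x (by omega)).mp hx
      exact ⟨h1, by nlinarith, h3⟩
    · obtain ⟨hx1, hx2, hx3, j, hj1, hj2, hj3⟩ := lAux_elem num 1 x (by omega) hx
      exact ⟨hx1, by nlinarith, hx3⟩
  · rintro ⟨h1, h2, h3⟩
    by_cases hs : x * x ≤ num
    · exact Or.inl ((mem_sAux num 1 x (by omega)).mpr ⟨h1, hs, h3⟩)
    · have hx0 : 0 < x := by omega
      obtain ⟨j, hjx⟩ := h3
      have hj1 : 1 ≤ j := by nlinarith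
      have hjlt : j < x := by nlinarith
      refine Or.inr ((mem_lAux num 1 x (by omega)).mpr
        ⟨j, hj1, by nlinarith, ⟨x, by rw [hjx]; ring⟩, ?_, by omega⟩)
      rw [PySem.Int.floordiv_eq_ediv_of_pos (by omega : (0:Int) < j), hjx]
      exact (Int.mul_ediv_cancel _ (by omega)).symm

lemma pairwise_keysA (num : Int) : (keysA num).Pairwise (· < ·) := by
  exact List.Pairwise.filter _ (PySem.List.pairwise_lt_pyRange_one 1 (num + 1))

lemma pairwise_keysB (num : Int) : (keysB num).Pairwise (· < ·) := by
  rw [keysB, List.pairwise_append]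
  refine ⟨pairwise_sAux num 1 (by omega), List.pairwise_reverse.mpr ?_, fun x hx y hy => ?_⟩
  · exact pairwise_lAux num 1 (by omega)
  · rw [List.mem_reverse] at hy
    obtain ⟨h1, h2, h3⟩ := (mem_sAux num 1 x (by omega)).mp hx
    obtain ⟨hy1, hy2, hy3, j, hj1, hj2, hj3⟩ := lAux_elem num 1 y (by omega) hy
    nlinarith

lemma keysB_eq_keysA (num : Int) : keysB num = keysA num := by
  have nd1 : (keysB num).Nodup := (pairwise_keysB num).imp ne_of_lt
  have nd2 : (keysA num).Nodup := (pairwise_keysA num).imp ne_of_lt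
  have hperm : (keysB num).Perm (keysA num) :=
    (List.perm_ext_iff_of_nodup nd1 nd2).mpr (fun x => by rw [mem_keysB, mem_keysA])
  exact hperm.eq_of_pairwise (fun a b _ _ h h' => absurd h' (lt_asymm h))
    (pairwise_keysB num) (pairwise_keysA num)

lemma itemsA (num : Int) :
    prime_and_factors num = (keysA num).map (fun k => (k, is_primeA k)) := by
  have nd : ((keysA num).map (fun i => i)).Nodup := by
    simpa using (pairwise_keysA num).imp ne_of_lt
  unfold prime_and_factors
  rw [← List.foldl_filter, ← keysA,
    PySem.Dict.items_foldl_insert_fresh (keysA num) (fun i => i) is_primeA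
      PySem.Dict.empty (fun a _ => PySem.Dict.contains_empty a) nd]
  simp [PySem.Dict.empty]

lemma itemsB (num : Int) :
    prime_and_factors_alt num = (keysB num).map (fun k => (k, is_primeB k)) := by
  have nd : ((keysB num).map (fun i => i)).Nodup := by
    simpa using (pairwise_keysB num).imp ne_of_lt
  unfold prime_and_factors_alt
  rw [divLoopB_eq]
  simp only [List.nil_append, ← List.foldl_append]
  rw [show sAux num 1 ++ (lAux num 1).reverse = keysB num from rfl,
    PySem.Dict.items_foldl_insert_fresh (keysB num) (fun i => i) is_primeB
      PySem.Dict.empty (fun a _ => PySem.Dict.contains_empty a) nd]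
  simp [PySem.Dict.empty]

-- ===== VERDICT (by name: the statement is the Claim_ definition above) =====
theorem prime_and_factors_spec : Claim_equal_prime_and_factors := by
  intro num _
  unfold Spec_prime_and_factors
  rw [itemsA, itemsB, keysB_eq_keysA, is_primeBA]
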